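-- pv_equiv track=rewrite | github.com/preranajadhav15/Bluepineapple | Python/15.py | split_at_lowercase
-- ===== SOURCE A (Python) =====
-- def split_at_lowercase(string):
--     result=[]
--     split=""
--
--     for i in string:
--         if i.islower():
--             result.append(split)
--             split=i
--         else:
--             split+=i
--
--     result.append(split)
--     return result
-- ===== SOURCE B (Python) =====
-- def split_at_lowercase(string):
--     indices = [i for i, c in enumerate(string) if c.islower()]
--     bounds = [0] + indices + [len(string)]
--     return [string[a:b] for a, b in zip(bounds, bounds[1:])]
-- ===== Notes on version B (the rewrite author's own statement) =====
-- stated objective: alternative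
-- what changed: Replaces the char-by-char buffer accumulation with an index-table-then-slice decomposition: one pass collects the lowercase positions, then the segments are produced by slicing between consecutive boundaries.
import Mathlib
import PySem

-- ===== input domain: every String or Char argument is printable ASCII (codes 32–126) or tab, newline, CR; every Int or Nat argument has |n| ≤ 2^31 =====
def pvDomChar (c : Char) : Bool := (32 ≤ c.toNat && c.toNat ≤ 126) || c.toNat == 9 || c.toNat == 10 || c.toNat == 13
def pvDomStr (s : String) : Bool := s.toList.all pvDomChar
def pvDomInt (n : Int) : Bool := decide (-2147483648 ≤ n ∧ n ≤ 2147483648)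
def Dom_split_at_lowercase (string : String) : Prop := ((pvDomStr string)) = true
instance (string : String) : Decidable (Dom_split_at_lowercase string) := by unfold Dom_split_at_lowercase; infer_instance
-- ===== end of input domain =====

-- B replaces A's char-by-char buffer accumulation by collecting lowercase positions once and slicing between consecutive boundaries (alternative decomposition, same cost class).


-- ===== PORT A =====
-- for i in string: if i.islower(): result.append(split); split = i  else: split += i;  result.append(split)
def split_at_lowercase (string : String) : List String :=
  let st := string.toList.foldl
    (fun (acc : List (List Char) × List Char) i =>
      if PySem.Chars.islower i then (acc.1 ++ [acc.2], [i]) else (acc.1, acc.2 ++ [i]))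
    ([], [])
  (st.1 ++ [st.2]).map String.ofList

-- ===== PORT B =====
-- indices = [i for i, c in enumerate(string) if c.islower()]
-- bounds = [0] + indices + [len(string)]
-- return [string[a:b] for a, b in zip(bounds, bounds[1:])]
def split_at_lowercase_alt (string : String) : List String :=
  let s := string.toList
  let indices : List Int :=
    (PySem.List.enumerate s 0).filterMap
      (fun p => if PySem.Chars.islower p.2 then some p.1 else none)
  let bounds : List Int := 0 :: (indices ++ [(s.length : Int)])
  (bounds.zip bounds.tail).map
    (fun p => String.ofList (PySem.List.slice s (some p.1) (some p.2)))

-- ===== PRECONDITION & SPEC =====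
def Spec_split_at_lowercase (string : String) (out : List String) : Prop := out = split_at_lowercase_alt string
instance (string : String) (out : List String) : Decidable (Spec_split_at_lowercase string out) := by unfold Spec_split_at_lowercase; infer_instance

-- ===== CLAIM (what is proved, stated in full; the proofs are below) =====
def Claim_equal_split_at_lowercase : Prop := ∀ (string : String), Dom_split_at_lowercase string → Spec_split_at_lowercase string (split_at_lowercase string)

-- ===== LEMMAS AND PROOFS =====

-- canonical recursive description of the segments: (first segment, remaining segments)
def pvSeg : List Char → List Char × List (List Char)
  | [] => ([], [])
  | c :: t =>
    let r := pvSeg t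
    if PySem.Chars.islower c then ([], (c :: r.1) :: r.2) else (c :: r.1, r.2)

-- A's fold equals the canonical segmentation
theorem pvA_fold (l : List Char) (res : List (List Char)) (split : List Char) :
    (l.foldl
        (fun (acc : List (List Char) × List Char) i =>
          if PySem.Chars.islower i then (acc.1 ++ [acc.2], [i]) else (acc.1, acc.2 ++ [i]))
        (res, split)).1 ++
      [(l.foldl
        (fun (acc : List (List Char) × List Char) i =>
          if PySem.Chars.islower i then (acc.1 ++ [acc.2], [i]) else (acc.1, acc.2 ++ [i]))
        (res, split)).2] = res ++ (split ++ (pvSeg l).1) :: (pvSeg l).2 := by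
  induction l generalizing res split with
  | nil => simp [pvSeg]
  | cons c t ih =>
    by_cases h : PySem.Chars.islower c = true <;>
      simp [pvSeg, h, List.foldl_cons, ih]

-- indices with shifted start
theorem pvIdx_shift (l : List Char) (s : Int) :
    (PySem.List.enumerate l (s + 1)).filterMap
      (fun p : Int × Char => if PySem.Chars.islower p.2 then some p.1 else none)
    = ((PySem.List.enumerate l s).filterMap
      (fun p : Int × Char => if PySem.Chars.islower p.2 then some p.1 else none)).map (· + 1) := by
  induction l generalizing s with
  | nil => simp [PySem.List.enumerate_nil]
  | cons c t ih =>
    by_cases h : PySem.Chars.islower c = true <;>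
      simp only [PySem.List.enumerate_cons, List.filterMap_cons, h, ite_true,
        ih (s + 1), ih s, List.map_cons, List.map_map] <;>
      simp

def pvIdx (l : List Char) : List Int :=
  (PySem.List.enumerate l 0).filterMap
    (fun p : Int × Char => if PySem.Chars.islower p.2 then some p.1 else none)

theorem pvIdx_cons (c : Char) (t : List Char) :
    pvIdx (c :: t) = (if PySem.Chars.islower c then [(0 : Int)] else []) ++ (pvIdx t).map (· + 1) := by
  by_cases h : PySem.Chars.islower c = true <;>
    simp [pvIdx, PySem.List.enumerate_cons, h, ← pvIdx_shift]

def pvU (l : List Char) : List Int := pvIdx l ++ [(l.length : Int)]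

theorem pvU_cons (c : Char) (t : List Char) :
    pvU (c :: t) = (if PySem.Chars.islower c then (0 : Int) :: (pvU t).map (· + 1) else (pvU t).map (· + 1)) := by
  by_cases h : PySem.Chars.islower c = true <;>
    simp [pvU, pvIdx_cons, h]

theorem pvU_nonneg (l : List Char) : ∀ x ∈ pvU l, 0 ≤ x := by
  intro x hx
  rcases List.mem_append.1 hx with h | h
  · rcases List.mem_filterMap.1 h with ⟨p, hp, he⟩
    rcases (PySem.List.mem_enumerate_iff _ _ _).1 hp with ⟨k, hk, rfl⟩
    split at he
    · cases he; positivity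
    · cases he
  · simp at h; omega

theorem pvU_ne_nil (l : List Char) : pvU l ≠ [] := by simp [pvU]

theorem pv_slice_shift (c : Char) (t : List Char) (a b : Int) (ha : 0 ≤ a) (hb : 0 ≤ b) :
    PySem.List.slice (c :: t) (some (a + 1)) (some (b + 1)) = PySem.List.slice t (some a) (some b) := by
  rw [PySem.List.slice_toNat (c :: t) (by omega) (by omega), PySem.List.slice_toNat t ha hb]
  have h1 : (a + 1).toNat = a.toNat + 1 := by omega
  have h2 : (b + 1).toNat = b.toNat + 1 := by omega
  rw [h1, h2, List.drop_succ_cons]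
  congr 1
  omega

theorem pv_slice_zero (c : Char) (t : List Char) (b : Int) (hb : 0 ≤ b) :
    PySem.List.slice (c :: t) (some 0) (some (b + 1)) = c :: PySem.List.slice t (some 0) (some b) := by
  rw [PySem.List.slice_toNat (c :: t) le_rfl (by omega), PySem.List.slice_toNat t le_rfl hb]
  have h2 : (b + 1).toNat = b.toNat + 1 := by omega
  simp [h2]

-- B's zip-of-bounds map equals the canonical segmentation
theorem pvB_key (l : List Char) :
    (((0 : Int) :: pvU l).zip (pvU l)).map
        (fun p => PySem.List.slice l (some p.1) (some p.2))
      = (pvSeg l).1 :: (pvSeg l).2 := by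
  induction l with
  | nil => simp [pvU, pvIdx, PySem.List.enumerate_nil, pvSeg, PySem.List.slice]
  | cons c t ih =>
    obtain ⟨b, v, hbv⟩ : ∃ b v, pvU t = b :: v := by
      cases h : pvU t with
      | nil => exact absurd h (pvU_ne_nil t)
      | cons b v => exact ⟨b, v, rfl⟩
    have hb0 : 0 ≤ b := pvU_nonneg t b (by simp [hbv])
    have hIH := ih
    rw [hbv, List.zip_cons_cons, List.map_cons, List.cons_eq_cons] at hIH
    obtain ⟨h1, h2⟩ := hIH
    have hz : (((b + 1) :: (v.map (· + 1))).zip (v.map (· + 1)))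
        = ((b :: v).zip v).map (fun p : Int × Int => (p.1 + 1, p.2 + 1)) := by
      have h := List.zip_map (f := (· + (1 : Int))) (g := (· + (1 : Int))) (l₁ := b :: v) (l₂ := v)
      simpa [Prod.map] using h
    have hcore :
        ((((0 : Int) :: ((b :: v).map (· + 1))).zip ((b :: v).map (· + 1))).map
          (fun p => PySem.List.slice (c :: t) (some p.1) (some p.2)))
        = (c :: (pvSeg t).1) :: (pvSeg t).2 := by
      simp only [List.map_cons, List.zip_cons_cons]
      refine List.cons_eq_cons.mpr ⟨?_, ?_⟩
      · rw [pv_slice_zero c t b hb0, h1]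
      · rw [hz, List.map_map, ← h2]
        apply List.map_congr_left
        intro p hp
        have hp1 : 0 ≤ p.1 := pvU_nonneg t p.1 (hbv ▸ (List.of_mem_zip hp).1)
        have hp2 : 0 ≤ p.2 := pvU_nonneg t p.2 (hbv ▸ List.mem_cons_of_mem b (List.of_mem_zip hp).2)
        simp [Function.comp, pv_slice_shift c t p.1 p.2 hp1 hp2]
    rw [pvU_cons]
    by_cases h : PySem.Chars.islower c = true
    · rw [if_pos h, hbv]
      simp only [List.map_cons, List.zip_cons_cons]
      have h00 : PySem.List.slice (c :: t) (some 0) (some 0) = [] := by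
        rw [PySem.List.slice_toNat (c :: t) le_rfl le_rfl]; simp
      simp only [List.map_cons, List.zip_cons_cons] at hcore
      rw [h00, hcore]
      simp [pvSeg, h]
    · rw [if_neg h, hbv, hcore]
      simp [pvSeg, h]

-- ===== VERDICT (by name: the statement is the Claim_ definition above) =====
theorem split_at_lowercase_spec : Claim_equal_split_at_lowercase := by
  intro s _
  show split_at_lowercase s = split_at_lowercase_alt s
  have hB : (((0 : Int) :: pvU s.toList).zip (pvU s.toList)).map
        (fun p => String.ofList (PySem.List.slice s.toList (some p.1) (some p.2)))
      = ((pvSeg s.toList).1 :: (pvSeg s.toList).2).map String.ofList := by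
    rw [← pvB_key s.toList, List.map_map]
    simp [Function.comp]
  unfold split_at_lowercase split_at_lowercase_alt
  simp only [List.tail_cons]
  rw [pvA_fold s.toList [] []]
  rw [show ((PySem.List.enumerate s.toList 0).filterMap
      (fun p : Int × Char => if PySem.Chars.islower p.2 then some p.1 else none))
      ++ [(s.toList.length : Int)] = pvU s.toList from rfl]
  rw [hB]
  simp
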